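-- pv_equiv track=rewrite | github.com/nebraszka/data-security-wut-22- | lab3.py | count_length_of_alphabet
-- ===== SOURCE A (Python) =====
-- from sre_parse import SPECIAL_CHARS
-- import string
--
-- LOWERCASE_LETTERS = list(string.ascii_lowercase)
--
-- UPPERCASE_LETTERS = list(string.ascii_uppercase)
--
-- SPECIAL_CHARS = list(string.punctuation)
--
-- def count_length_of_alphabet(key):
--     alph_lenght = 0
--     check_letters = {"lowercase" : False, "uppercase": False, "special" : False}
--     for sign in key:
--         if sign in LOWERCASE_LETTERS:
--             check_letters["lowercase"] = True
--         if sign in UPPERCASE_LETTERS: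
--             check_letters["uppercase"] = True
--         if sign in SPECIAL_CHARS:
--             check_letters["special"] = True
--
--     if check_letters["lowercase"] == True:
--         alph_lenght += len(LOWERCASE_LETTERS)
--     if check_letters["uppercase"] == True:
--         alph_lenght += len(UPPERCASE_LETTERS)
--     if check_letters["special"] == True:
--         alph_lenght += len(SPECIAL_CHARS)
--
--     return alph_lenght
-- ===== SOURCE B (Python) =====
-- import string
--
-- def count_length_of_alphabet(key):
--     keyset = set(key)
--     total = 0
--     for alphabet in (string.ascii_lowercase, string.ascii_uppercase, string.punctuation):
--         if keyset & set(alphabet):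
--             total += len(alphabet)
--     return total
-- ===== Notes on version B (the rewrite author's own statement) =====
-- stated objective: faster
-- what changed: Instead of scanning each key character against the three alphabet lists maintaining boolean flags, B builds set(key) once and iterates over the three constant alphabets, adding an alphabet's length when its set intersection with the key-set is nonempty.
import Mathlib
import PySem

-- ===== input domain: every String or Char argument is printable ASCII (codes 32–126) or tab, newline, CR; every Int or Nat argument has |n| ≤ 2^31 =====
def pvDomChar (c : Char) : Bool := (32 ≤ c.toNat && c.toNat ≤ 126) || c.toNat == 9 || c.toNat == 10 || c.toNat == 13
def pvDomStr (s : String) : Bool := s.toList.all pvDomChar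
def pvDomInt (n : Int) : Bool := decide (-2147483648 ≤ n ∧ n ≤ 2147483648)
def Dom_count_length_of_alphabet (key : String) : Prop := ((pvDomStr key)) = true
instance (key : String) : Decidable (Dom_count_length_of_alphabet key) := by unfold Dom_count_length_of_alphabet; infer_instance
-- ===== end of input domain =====

-- ===== PORT A =====
-- B iterates over the three constant alphabets testing set intersection against set(key), instead of per-character flags (idiomatic restructure).
def pvLOWER : List Char := "abcdefghijklmnopqrstuvwxyz".toList
def pvUPPER : List Char := "ABCDEFGHIJKLMNOPQRSTUVWXYZ".toList
def pvSPECIAL : List Char := "!\"#$%&'()*+,-./:;<=>?@[\\]^_`{|}~".toList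

def count_length_of_alphabet (key : String) : Int :=
  let check := key.toList.foldl (fun (st : Bool × Bool × Bool) sign =>
    let st := if pvLOWER.contains sign then (true, st.2.1, st.2.2) else st
    let st := if pvUPPER.contains sign then (st.1, true, st.2.2) else st
    if pvSPECIAL.contains sign then (st.1, st.2.1, true) else st) (false, false, false)
  let a : Int := 0
  let a := if check.1 = true then a + (pvLOWER.length : Int) else a
  let a := if check.2.1 = true then a + (pvUPPER.length : Int) else a
  if check.2.2 = true then a + (pvSPECIAL.length : Int) else a

-- ===== PORT B =====
def count_length_of_alphabet_alt (key : String) : Int :=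
  let keyset : PySem.Set Char := PySem.Set.ofList key.toList
  [pvLOWER, pvUPPER, pvSPECIAL].foldl (fun (total : Int) alphabet =>
    if PySem.Set.inter keyset (PySem.Set.ofList alphabet) ≠ [] then total + (alphabet.length : Int)
    else total) 0

-- ===== PRECONDITION & SPEC =====
def Spec_count_length_of_alphabet (key : String) (out : Int) : Prop := out = count_length_of_alphabet_alt key
instance (key : String) (out : Int) : Decidable (Spec_count_length_of_alphabet key out) := by unfold Spec_count_length_of_alphabet; infer_instance

-- ===== CLAIM (what is proved, stated in full; the proofs are below) =====
def Claim_equal_count_length_of_alphabet : Prop := ∀ (key : String), Dom_count_length_of_alphabet key → Spec_count_length_of_alphabet key (count_length_of_alphabet key)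

-- ===== LEMMAS AND PROOFS =====

-- ===== VERDICT (by name: the statement is the Claim_ definition above) =====
-- fold of A computes the three "any" flags
lemma pvFoldA (l : List Char) (st : Bool × Bool × Bool) :
    l.foldl (fun (st : Bool × Bool × Bool) sign =>
      let st := if pvLOWER.contains sign then (true, st.2.1, st.2.2) else st
      let st := if pvUPPER.contains sign then (st.1, true, st.2.2) else st
      if pvSPECIAL.contains sign then (st.1, st.2.1, true) else st) st
    = (st.1 || l.any pvLOWER.contains, st.2.1 || l.any pvUPPER.contains,
       st.2.2 || l.any pvSPECIAL.contains) := by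
  induction l generalizing st with
  | nil => simp
  | cons c t ih =>
    simp only [List.foldl_cons, List.any_cons, ih]
    by_cases h1 : c ∈ pvLOWER <;> by_cases h2 : c ∈ pvUPPER <;>
      by_cases h3 : c ∈ pvSPECIAL <;>
      simp [h1, h2, h3, Bool.or_comm]

-- B's intersection test is the "any" flag
lemma pvInterTest (l alph : List Char) :
    (PySem.Set.inter (PySem.Set.ofList l) (PySem.Set.ofList alph) ≠ []) ↔
      l.any alph.contains = true := by
  rw [← List.isEmpty_eq_false_iff, List.isEmpty_eq_false_iff_exists_mem]
  simp only [PySem.Set.mem_inter, PySem.Set.mem_ofList, List.any_eq_true]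
  simp

theorem count_length_of_alphabet_spec : Claim_equal_count_length_of_alphabet := by
  intro key _
  show count_length_of_alphabet key = count_length_of_alphabet_alt key
  unfold count_length_of_alphabet count_length_of_alphabet_alt
  simp only [pvFoldA, Bool.false_or, List.foldl_cons, List.foldl_nil]
  by_cases h1 : key.toList.any pvLOWER.contains <;>
    by_cases h2 : key.toList.any pvUPPER.contains <;>
    by_cases h3 : key.toList.any pvSPECIAL.contains <;>
      first
      | simp [h1, h2, h3, pvInterTest, pvLOWER, pvUPPER, pvSPECIAL]
      | (simp [pvInterTest, pvLOWER, pvUPPER, pvSPECIAL]; decide)
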